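-- pv_equiv track=rewrite | github.com/tigerhoang03/causal-lstm-stock-movement | src/causal_lstm_stock/nlp/finbert_inference.py | _label_indices
-- ===== SOURCE A (Python) =====
-- def _label_indices(id2label: dict[int, str]) -> tuple[int, int, int]:
--     lowered = {k: v.lower() for k, v in id2label.items()}
--
--     def _find(keyword: str, fallback: int) -> int:
--         for idx, label in lowered.items():
--             if keyword in label:
--                 return idx
--         return fallback
--
--     pos_idx = _find("pos", 0)
--     neu_idx = _find("neu", 1 if len(id2label) > 1 else 0)
--     neg_idx = _find("neg", 2 if len(id2label) > 2 else 0)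
--     return pos_idx, neu_idx, neg_idx
-- ===== SOURCE B (Python) =====
-- def _label_indices(id2label: dict[int, str]) -> tuple[int, int, int]:
--     pos_idx = neu_idx = neg_idx = None
--     for idx, label in id2label.items():
--         low = label.lower()
--         if pos_idx is None and "pos" in low:
--             pos_idx = idx
--         if neu_idx is None and "neu" in low:
--             neu_idx = idx
--         if neg_idx is None and "neg" in low:
--             neg_idx = idx
--     n = len(id2label)
--     return (pos_idx if pos_idx is not None else 0,
--             neu_idx if neu_idx is not None else (1 if n > 1 else 0),
--             neg_idx if neg_idx is not None else (2 if n > 2 else 0))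
-- ===== Notes on version B (the rewrite author's own statement) =====
-- stated objective: faster
-- what changed: Replaces three separate scans over a pre-built lowered-label dict (one per keyword) with a single pass that lowers each label once and fills three pending indices, applying the fallbacks afterwards.
import Mathlib
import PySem

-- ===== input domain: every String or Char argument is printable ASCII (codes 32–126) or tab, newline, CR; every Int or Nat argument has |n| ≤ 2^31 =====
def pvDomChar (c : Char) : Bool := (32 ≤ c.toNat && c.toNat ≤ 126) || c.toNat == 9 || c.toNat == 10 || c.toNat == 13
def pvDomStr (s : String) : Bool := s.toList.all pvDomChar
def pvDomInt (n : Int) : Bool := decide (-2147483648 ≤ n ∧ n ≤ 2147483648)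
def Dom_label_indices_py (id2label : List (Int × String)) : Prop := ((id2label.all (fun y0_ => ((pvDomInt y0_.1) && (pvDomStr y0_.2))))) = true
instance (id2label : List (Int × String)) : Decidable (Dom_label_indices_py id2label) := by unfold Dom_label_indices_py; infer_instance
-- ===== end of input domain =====

-- B replaces A's three keyword scans over a pre-lowered dict by one pass that lowers each
-- label once and records the first match per keyword, applying the fallbacks afterwards.


-- ===== PORT A =====
-- A's inner '_find': scan the lowered items in order, return the first key whose label
-- contains the keyword, else the fallback.
def pvFind (keyword : List Char) (lowered : List (Int × List Char)) (fallback : Int) : Int :=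
  match lowered with
  | [] => fallback
  | (idx, label) :: rest =>
      if PySem.Chars.isIn keyword label then idx else pvFind keyword rest fallback

def label_indices_py (id2label : List (Int × String)) : Int × Int × Int :=
  let lowered := id2label.map (fun kv => (kv.1, PySem.Chars.lower kv.2.toList))
  let pos_idx := pvFind "pos".toList lowered 0
  let neu_idx := pvFind "neu".toList lowered (if id2label.length > 1 then 1 else 0)
  let neg_idx := pvFind "neg".toList lowered (if id2label.length > 2 then 2 else 0)
  (pos_idx, neu_idx, neg_idx)

-- ===== PORT B =====
-- B's loop body: lower the label once, fill each still-pending index on a match.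
def pvStep (acc : Option Int × Option Int × Option Int) (kv : Int × String) :
    Option Int × Option Int × Option Int :=
  let low := PySem.Chars.lower kv.2.toList
  ( if acc.1.isSome then acc.1 else if PySem.Chars.isIn "pos".toList low then some kv.1 else none,
    if acc.2.1.isSome then acc.2.1 else if PySem.Chars.isIn "neu".toList low then some kv.1 else none,
    if acc.2.2.isSome then acc.2.2 else if PySem.Chars.isIn "neg".toList low then some kv.1 else none )

def label_indices_py_alt (id2label : List (Int × String)) : Int × Int × Int :=
  let acc := id2label.foldl pvStep (none, none, none)
  let n := id2label.length
  ( acc.1.getD 0,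
    acc.2.1.getD (if n > 1 then 1 else 0),
    acc.2.2.getD (if n > 2 then 2 else 0) )

-- ===== PRECONDITION & SPEC =====
def Spec_label_indices_py (id2label : List (Int × String)) (out : Int × Int × Int) : Prop := out = label_indices_py_alt id2label
instance (id2label : List (Int × String)) (out : Int × Int × Int) : Decidable (Spec_label_indices_py id2label out) := by unfold Spec_label_indices_py; infer_instance

-- ===== CLAIM (what is proved, stated in full; the proofs are below) =====
def Claim_equal_label_indices_py : Prop := ∀ (id2label : List (Int × String)), Dom_label_indices_py id2label → Spec_label_indices_py id2label (label_indices_py id2label)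

-- ===== LEMMAS AND PROOFS =====

-- First key (as an Option) whose lowered label contains the keyword.
def pvFirst (keyword : List Char) (l : List (Int × String)) : Option Int :=
  match l with
  | [] => none
  | (idx, s) :: rest =>
      if PySem.Chars.isIn keyword (PySem.Chars.lower s.toList) then some idx
      else pvFirst keyword rest

-- 'continue from a possibly-filled slot': some x stays, none scans the rest.
def pvExt (o : Option Int) (keyword : List Char) (l : List (Int × String)) : Option Int :=
  match o with
  | some x => some x
  | none => pvFirst keyword l

-- one loop step of B advances each pending slot exactly like A's scan does
theorem pvExt_step (kw : List Char) (o : Option Int) (i : Int) (s : String)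
    (rest : List (Int × String)) :
    pvExt (if o.isSome then o
           else if PySem.Chars.isIn kw (PySem.Chars.lower s.toList) then some i else none) kw rest
      = pvExt o kw ((i, s) :: rest) := by
  cases o with
  | none =>
      simp only [Option.isSome_none, Bool.false_eq_true, if_false]
      show _ = (if PySem.Chars.isIn kw (PySem.Chars.lower s.toList) then some i
                else pvFirst kw rest)
      split <;> rfl
  | some x => rfl

theorem pvExt_none (kw : List Char) (l : List (Int × String)) :
    pvExt none kw l = pvFirst kw l := rfl

theorem foldl_pvStep (l : List (Int × String)) (o1 o2 o3 : Option Int) :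
    l.foldl pvStep (o1, o2, o3) =
      (pvExt o1 "pos".toList l, pvExt o2 "neu".toList l, pvExt o3 "neg".toList l) := by
  induction l generalizing o1 o2 o3 with
  | nil => cases o1 <;> cases o2 <;> cases o3 <;> rfl
  | cons kv rest ih =>
      obtain ⟨i, s⟩ := kv
      show rest.foldl pvStep (pvStep (o1, o2, o3) (i, s)) = _
      rw [show pvStep (o1, o2, o3) (i, s) =
        ( if o1.isSome then o1 else if PySem.Chars.isIn "pos".toList (PySem.Chars.lower s.toList) then some i else none,
          if o2.isSome then o2 else if PySem.Chars.isIn "neu".toList (PySem.Chars.lower s.toList) then some i else none,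
          if o3.isSome then o3 else if PySem.Chars.isIn "neg".toList (PySem.Chars.lower s.toList) then some i else none ) from rfl]
      rw [ih]
      exact congrArg₂ Prod.mk (pvExt_step _ o1 i s rest)
        (congrArg₂ Prod.mk (pvExt_step _ o2 i s rest) (pvExt_step _ o3 i s rest))

theorem pvFind_eq_pvFirst (kw : List Char) (l : List (Int × String)) (fb : Int) :
    pvFind kw (l.map (fun kv => (kv.1, PySem.Chars.lower kv.2.toList))) fb =
      (pvFirst kw l).getD fb := by
  induction l with
  | nil => rfl
  | cons kv rest ih =>
      obtain ⟨i, s⟩ := kv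
      simp only [List.map_cons, pvFind, pvFirst]
      split <;> simp [ih]

-- ===== VERDICT (by name: the statement is the Claim_ definition above) =====
theorem label_indices_py_spec : Claim_equal_label_indices_py := by
  intro id2label _
  show label_indices_py id2label = label_indices_py_alt id2label
  simp only [label_indices_py, label_indices_py_alt, foldl_pvStep, pvExt_none,
    pvFind_eq_pvFirst]
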